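-- pv_equiv track=rewrite | github.com/slr-09/Algorithm | 프로그래머스/unrated/148653. 마법의 엘리베이터/마법의 엘리베이터.py | solution
-- ===== SOURCE A (Python) =====
-- def solution(storey):
--     answer = 0
--     num = len(str(storey))
--
--     while storey:
--         storey,r = divmod(storey,10)
--         if r>5 or (r==5 and storey%10>=5):
--             answer += 10-r
--             storey += 1
--         else:
--             answer += r
--
--     return answer
-- ===== SOURCE B (Python) =====
-- def solution(storey):
--     if storey == 0:
--         return 0
--     q, r = divmod(storey, 10)
--     if r <= 4:
--         return r + solution(q)
--     if r >= 6:
--         return (10 - r) + solution(q + 1)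
--     return 5 + min(solution(q), solution(q + 1))
-- ===== Notes on version B (the rewrite author's own statement) =====
-- stated objective: alternative
-- what changed: Replaces A's greedy while-loop over divmod digits with an explicit tie-break lookahead by a pure recursion over the digits that takes the min over the round-down and round-up subproblems at a trailing 5.
import Mathlib
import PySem

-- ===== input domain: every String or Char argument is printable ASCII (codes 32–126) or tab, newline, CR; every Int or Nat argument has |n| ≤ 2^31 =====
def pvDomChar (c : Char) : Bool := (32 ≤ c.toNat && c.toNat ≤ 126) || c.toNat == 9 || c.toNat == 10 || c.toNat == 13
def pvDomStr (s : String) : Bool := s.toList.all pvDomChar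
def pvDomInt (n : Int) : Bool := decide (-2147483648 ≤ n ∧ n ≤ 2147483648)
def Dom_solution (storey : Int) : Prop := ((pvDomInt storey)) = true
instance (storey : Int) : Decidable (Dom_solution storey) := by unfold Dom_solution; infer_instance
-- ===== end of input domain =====

-- B replaces A's greedy loop with an explicit tie-break lookahead by a digit-wise recursion taking the min over the round-down/round-up subproblems (alternative decomposition, same cost).
-- Both ports recurse on a fuel parameter (storey.natAbs + 1 always suffices: each step strictly shrinks |storey|); this is only a totality guard, the fuel-0 case is never reached.

-- ===== PORT A =====
def solutionLoopF : Nat → Int → Int → Int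
  | 0, _, answer => answer   -- unreachable with the fuel supplied below
  | f + 1, storey, answer =>
    if storey = 0 then answer
    else
      if PySem.Int.mod storey 10 > 5 ∨
         (PySem.Int.mod storey 10 = 5 ∧ PySem.Int.mod (PySem.Int.floordiv storey 10) 10 ≥ 5) then
        solutionLoopF f (PySem.Int.floordiv storey 10 + 1) (answer + (10 - PySem.Int.mod storey 10))
      else
        solutionLoopF f (PySem.Int.floordiv storey 10) (answer + PySem.Int.mod storey 10)

def solution (storey : Int) : Int :=
  let _num := (PySem.Int.toStr storey).length   -- A's unused 'num = len(str(storey))'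
  solutionLoopF (storey.natAbs + 1) storey 0

-- ===== PORT B =====
def solutionAltF : Nat → Int → Int
  | 0, _ => 0   -- unreachable with the fuel supplied below
  | f + 1, storey =>
    if storey = 0 then 0
    else
      if PySem.Int.mod storey 10 ≤ 4 then
        PySem.Int.mod storey 10 + solutionAltF f (PySem.Int.floordiv storey 10)
      else if PySem.Int.mod storey 10 ≥ 6 then
        (10 - PySem.Int.mod storey 10) + solutionAltF f (PySem.Int.floordiv storey 10 + 1)
      else
        5 + min (solutionAltF f (PySem.Int.floordiv storey 10))
                (solutionAltF f (PySem.Int.floordiv storey 10 + 1))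

def solution_alt (storey : Int) : Int := solutionAltF (storey.natAbs + 1) storey

-- ===== PRECONDITION & SPEC =====
def Spec_solution (storey : Int) (out : Int) : Prop := out = solution_alt storey
instance (storey : Int) (out : Int) : Decidable (Spec_solution storey out) := by unfold Spec_solution; infer_instance

-- ===== CLAIM (what is proved, stated in full; the proofs are below) =====
def Claim_equal_solution : Prop := ∀ (storey : Int), Dom_solution storey → Spec_solution storey (solution storey)

-- ===== LEMMAS AND PROOFS =====

-- div/mod characterization
theorem pv_dm (n : Int) :
    n = 10 * PySem.Int.floordiv n 10 + PySem.Int.mod n 10 ∧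
    0 ≤ PySem.Int.mod n 10 ∧ PySem.Int.mod n 10 < 10 := by
  rw [PySem.Int.floordiv_eq_ediv_of_pos (show (0:Int) < 10 by norm_num),
      PySem.Int.mod_eq_emod_of_pos (show (0:Int) < 10 by norm_num)]
  refine ⟨?_, ?_, ?_⟩ <;> omega

-- the result of solutionAltF does not depend on the fuel, as long as it is sufficient
theorem pv_altF_congr : ∀ (f g : Nat) (n : Int), n.natAbs < f → n.natAbs < g →
    solutionAltF f n = solutionAltF g n := by
  intro f
  induction f with
  | zero => intro g n hf _; omega
  | succ f ih =>
    intro g n hf hg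
    cases g with
    | zero => omega
    | succ g =>
      by_cases h0 : n = 0
      · subst h0; simp [solutionAltF]
      obtain ⟨hd, hr0, hr9⟩ := pv_dm n
      simp only [solutionAltF, if_neg h0]
      by_cases h4 : PySem.Int.mod n 10 ≤ 4
      · rw [if_pos h4, if_pos h4,
            ih g (PySem.Int.floordiv n 10) (by omega) (by omega)]
      · by_cases h6 : PySem.Int.mod n 10 ≥ 6
        · rw [if_neg h4, if_neg h4, if_pos h6, if_pos h6,
              ih g (PySem.Int.floordiv n 10 + 1) (by omega) (by omega)]
        · rw [if_neg h4, if_neg h4, if_neg h6, if_neg h6,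
              ih g (PySem.Int.floordiv n 10) (by omega) (by omega),
              ih g (PySem.Int.floordiv n 10 + 1) (by omega) (by omega)]

theorem pv_alt_zero : solution_alt 0 = 0 := by
  simp [solution_alt, solutionAltF]

-- expand solution_alt at n ≠ 0 via the unique decomposition n = 10*q + r
theorem pv_alt_val (n q r : Int) (hd : n = 10 * q + r) (h0 : 0 ≤ r) (h9 : r < 10) (hn : n ≠ 0) :
    solution_alt n =
      if r ≤ 4 then r + solution_alt q
      else if r ≥ 6 then (10 - r) + solution_alt (q + 1)
      else 5 + min (solution_alt q) (solution_alt (q + 1)) := by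
  have h := pv_dm n
  have hq : PySem.Int.floordiv n 10 = q := by omega
  have hr : PySem.Int.mod n 10 = r := by omega
  show solutionAltF (n.natAbs + 1) n = _
  simp only [solutionAltF, if_neg hn, hq, hr]
  by_cases h4 : r ≤ 4
  · rw [if_pos h4, if_pos h4,
        pv_altF_congr n.natAbs (q.natAbs + 1) q (by omega) (by omega)]
    rfl
  · by_cases h6 : r ≥ 6
    · rw [if_neg h4, if_neg h4, if_pos h6, if_pos h6,
          pv_altF_congr n.natAbs ((q+1).natAbs + 1) (q+1) (by omega) (by omega)]
      rfl
    · rw [if_neg h4, if_neg h4, if_neg h6, if_neg h6,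
          pv_altF_congr n.natAbs (q.natAbs + 1) q (by omega) (by omega),
          pv_altF_congr n.natAbs ((q+1).natAbs + 1) (q+1) (by omega) (by omega)]
      rfl

-- small closed values
theorem pv_alt_one : solution_alt 1 = 1 := by
  rw [pv_alt_val 1 0 1 (by ring) (by norm_num) (by norm_num) (by norm_num), pv_alt_zero]
  norm_num

theorem pv_alt_neg_one : solution_alt (-1) = 1 := by
  rw [pv_alt_val (-1) (-1) 9 (by ring) (by norm_num) (by norm_num) (by norm_num)]
  split_ifs <;> simp_all [pv_alt_zero]

-- solution_alt changes by at most 1 between consecutive inputs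
theorem pv_lipschitz (n : Int) :
    solution_alt n ≤ solution_alt (n + 1) + 1 ∧ solution_alt (n + 1) ≤ solution_alt n + 1 := by
  by_cases h0 : n = 0
  · subst h0
    rw [show (0:Int) + 1 = 1 from by norm_num, pv_alt_zero, pv_alt_one]
    omega
  by_cases h1 : n = -1
  · subst h1
    rw [show (-1:Int) + 1 = 0 from by norm_num, pv_alt_zero, pv_alt_neg_one]
    omega
  obtain ⟨hd, hr0, hr9⟩ := pv_dm n
  have ihq := pv_lipschitz (PySem.Int.floordiv n 10)
  by_cases h9 : PySem.Int.mod n 10 = 9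
  · -- carry: n+1 = 10*(q+1)
    rw [pv_alt_val n (PySem.Int.floordiv n 10) 9 (by omega) (by norm_num) (by norm_num) h0,
        pv_alt_val (n+1) (PySem.Int.floordiv n 10 + 1) 0 (by omega) (by norm_num) (by norm_num) (by omega)]
    split_ifs <;> omega
  · rw [pv_alt_val n (PySem.Int.floordiv n 10) (PySem.Int.mod n 10) (by omega) hr0 hr9 h0,
        pv_alt_val (n+1) (PySem.Int.floordiv n 10) (PySem.Int.mod n 10 + 1) (by omega) (by omega) (by omega) (by omega)]
    simp only [min_def]
    split_ifs <;> omega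
termination_by n.natAbs
decreasing_by have := pv_dm n; omega

-- the direction of A's tie-break agrees with the min
theorem pv_step_dir (m : Int) :
    (PySem.Int.mod m 10 ≥ 5 → solution_alt (m + 1) ≤ solution_alt m) ∧
    (PySem.Int.mod m 10 ≤ 4 → solution_alt m ≤ solution_alt (m + 1)) := by
  by_cases h0 : m = 0
  · subst h0
    have h := pv_dm 0
    rw [show (0:Int) + 1 = 1 from by norm_num, pv_alt_zero, pv_alt_one]
    constructor <;> intro hc <;> omega
  by_cases h1 : m = -1
  · subst h1
    have h := pv_dm (-1)
    rw [show (-1:Int) + 1 = 0 from by norm_num, pv_alt_zero, pv_alt_neg_one]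
    constructor <;> intro hc <;> omega
  obtain ⟨hd, hr0, hr9⟩ := pv_dm m
  have lp := pv_lipschitz (PySem.Int.floordiv m 10)
  by_cases h9 : PySem.Int.mod m 10 = 9
  · rw [pv_alt_val m (PySem.Int.floordiv m 10) 9 (by omega) (by norm_num) (by norm_num) h0,
        pv_alt_val (m+1) (PySem.Int.floordiv m 10 + 1) 0 (by omega) (by norm_num) (by norm_num) (by omega)]
    constructor <;> intro hc <;> split_ifs <;> omega
  · rw [pv_alt_val m (PySem.Int.floordiv m 10) (PySem.Int.mod m 10) (by omega) hr0 hr9 h0,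
        pv_alt_val (m+1) (PySem.Int.floordiv m 10) (PySem.Int.mod m 10 + 1) (by omega) (by omega) (by omega) (by omega)]
    simp only [min_def]
    constructor <;> intro hc <;> split_ifs <;> omega

-- with sufficient fuel, A's loop computes the accumulator plus B's value
theorem pv_loop : ∀ (f : Nat) (n a : Int), n.natAbs < f → solutionLoopF f n a = a + solution_alt n := by
  intro f
  induction f with
  | zero => intro n a hf; omega
  | succ f ih =>
    intro n a hf
    by_cases h0 : n = 0
    · subst h0; simp [solutionLoopF, pv_alt_zero]
    obtain ⟨hd, hr0, hr9⟩ := pv_dm n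
    simp only [solutionLoopF, if_neg h0]
    rw [pv_alt_val n (PySem.Int.floordiv n 10) (PySem.Int.mod n 10) (by omega) hr0 hr9 h0]
    have sd := pv_step_dir (PySem.Int.floordiv n 10)
    by_cases hc : PySem.Int.mod n 10 > 5 ∨
        (PySem.Int.mod n 10 = 5 ∧ PySem.Int.mod (PySem.Int.floordiv n 10) 10 ≥ 5)
    · rw [if_pos hc, ih (PySem.Int.floordiv n 10 + 1) (a + (10 - PySem.Int.mod n 10)) (by omega)]
      rcases hc with hgt | ⟨h5, htie⟩
      · rw [if_neg (by omega), if_pos (by omega)]; ring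
      · rw [if_neg (by omega), if_neg (by omega), h5]
        have hle := sd.1 htie
        rw [min_eq_right hle]; ring
    · rw [if_neg hc, ih (PySem.Int.floordiv n 10) (a + PySem.Int.mod n 10) (by omega)]
      rw [not_or] at hc
      by_cases h5 : PySem.Int.mod n 10 = 5
      · have htie : ¬ PySem.Int.mod (PySem.Int.floordiv n 10) 10 ≥ 5 := fun ht => hc.2 ⟨h5, ht⟩
        rw [if_neg (by omega), if_neg (by omega), h5]
        have hle := sd.2 (by omega)
        rw [min_eq_left hle]; ring
      · rw [if_pos (by omega)]; ring

-- ===== VERDICT (by name: the statement is the Claim_ definition above) =====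
theorem solution_spec : Claim_equal_solution := by
  intro storey _
  unfold Spec_solution solution
  simpa using pv_loop (storey.natAbs + 1) storey 0 (by omega)
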